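-- pv_equiv track=rewrite | github.com/RahulRagesh/HapticMappingModel | 3D_SurfacePlot_Test.py | ZLayering
-- ===== SOURCE A (Python) =====
-- def ZLayering(xyz_Cyl):
--     xyz_Cyl = sorted(xyz_Cyl, key=lambda x: x[2])  # Sort With Respect to Z coordinates
--     ZSet = set()
--     ZList = []
--     temp = []
--     for rho, phi, z in xyz_Cyl:
--         if z not in ZSet:
--             ZList.append(temp)
--             temp = [(rho, phi)]
--             ZSet.add(z)
--         else:
--             temp.append((rho, phi))
--     ZList.append(temp)
--     ZList.remove([])
--     ZListSorted = []
--     for a in ZList: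
--         ZListSorted.append(sorted(a, key=lambda x: x[1]))  # Sort Each Z layer With Respect To Phi
--
--     return ZListSorted
-- ===== SOURCE B (Python) =====
-- def ZLayering(xyz_Cyl):
--     groups = {}
--     for rho, phi, z in xyz_Cyl:
--         groups[z] = groups.get(z, []) + [(rho, phi)]
--     return [sorted(groups[z], key=lambda p: p[1]) for z in sorted(groups)]
-- ===== Notes on version B (the rewrite author's own statement) =====
-- stated objective: idiomatic
-- what changed: B replaces A's whole-list pre-sort plus consecutive-run grouping loop (with a seen-set and a trailing remove([])) by a single pass that indexes (rho,phi) pairs in a dict keyed by z, then emits the groups in sorted-key order, each sorted by phi.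
import Mathlib
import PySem

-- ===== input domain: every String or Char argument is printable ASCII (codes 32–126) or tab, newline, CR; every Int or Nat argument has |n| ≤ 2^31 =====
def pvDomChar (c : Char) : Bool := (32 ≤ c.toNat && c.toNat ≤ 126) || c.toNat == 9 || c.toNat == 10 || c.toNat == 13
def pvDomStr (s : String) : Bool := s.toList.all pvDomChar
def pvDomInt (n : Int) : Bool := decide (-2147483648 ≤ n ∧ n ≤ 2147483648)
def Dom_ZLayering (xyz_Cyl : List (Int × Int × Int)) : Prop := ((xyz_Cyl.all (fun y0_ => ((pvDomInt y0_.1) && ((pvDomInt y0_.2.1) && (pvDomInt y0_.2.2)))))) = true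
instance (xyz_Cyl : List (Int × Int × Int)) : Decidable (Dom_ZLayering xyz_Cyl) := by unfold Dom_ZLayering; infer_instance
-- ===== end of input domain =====

-- B groups the points by z in a dict in one pass and emits the groups in sorted-key order
-- (each sorted by phi), replacing A's whole-list pre-sort + consecutive-run grouping loop.

-- ===== PORT A =====
def ZLayering (xyz_Cyl : List (Int × Int × Int)) : List (List (Int × Int)) :=
  let s := PySem.List.sorted xyz_Cyl (fun x => x.2.2) false
  let st := s.foldl
    (fun (st : PySem.Set Int × List (List (Int × Int)) × List (Int × Int)) t =>
      if !(PySem.Set.contains st.1 t.2.2) then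
        -- ZList.append(temp); temp = [(rho, phi)]; ZSet.add(z)
        (PySem.Set.add st.1 t.2.2, st.2.1 ++ [st.2.2], [(t.1, t.2.1)])
      else
        (st.1, st.2.1, st.2.2 ++ [(t.1, t.2.1)]))
    (PySem.Set.empty, [], [])
  let zl := st.2.1 ++ [st.2.2]
  -- ZList.remove([]) never raises: the initially empty temp is always the first entry of ZList
  let zl2 := (PySem.List.remove? zl ([] : List (Int × Int))).getD []
  zl2.map (fun a => PySem.List.sorted a (fun x => x.2) false)

-- ===== PORT B =====
def ZLayering_alt (xyz_Cyl : List (Int × Int × Int)) : List (List (Int × Int)) :=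
  let groups := xyz_Cyl.foldl
    (fun (d : PySem.Dict Int (List (Int × Int))) t =>
      d.modify t.2.2 [] (fun g => g ++ [(t.1, t.2.1)]))
    PySem.Dict.empty
  (PySem.List.sorted groups.keys (fun z => z) false).map
    (fun z => PySem.List.sorted (groups.getD z []) (fun p => p.2) false)

-- ===== PRECONDITION & SPEC =====
def Spec_ZLayering (xyz_Cyl : List (Int × Int × Int)) (out : List (List (Int × Int))) : Prop := out = ZLayering_alt xyz_Cyl
instance (xyz_Cyl : List (Int × Int × Int)) (out : List (List (Int × Int))) : Decidable (Spec_ZLayering xyz_Cyl out) := by unfold Spec_ZLayering; infer_instance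

-- ===== CLAIM (what is proved, stated in full; the proofs are below) =====
def Claim_equal_ZLayering : Prop := ∀ (xyz_Cyl : List (Int × Int × Int)), Dom_ZLayering xyz_Cyl → Spec_ZLayering xyz_Cyl (ZLayering xyz_Cyl)

-- ===== LEMMAS AND PROOFS =====

def pvStepA (st : PySem.Set Int × List (List (Int × Int)) × List (Int × Int))
    (t : Int × Int × Int) : PySem.Set Int × List (List (Int × Int)) × List (Int × Int) :=
  if !(PySem.Set.contains st.1 t.2.2) then
    (PySem.Set.add st.1 t.2.2, st.2.1 ++ [st.2.2], [(t.1, t.2.1)])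
  else
    (st.1, st.2.1, st.2.2 ++ [(t.1, t.2.1)])

lemma pvFoldA_run (r : List (Int × Int × Int)) (zs : PySem.Set Int)
    (zl : List (List (Int × Int))) (tmp : List (Int × Int))
    (h : ∀ u ∈ r, PySem.Set.contains zs u.2.2 = true) :
    r.foldl pvStepA (zs, zl, tmp) = (zs, zl, tmp ++ r.map (fun u => (u.1, u.2.1))) := by
  induction r generalizing tmp with
  | nil => simp
  | cons u r ih =>
    have hu := h u (by simp)
    simp only [List.foldl_cons, pvStepA, hu, Bool.not_true, Bool.false_eq_true, if_false]
    rw [ih _ (fun v hv => h v (by simp [hv]))]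
    simp

lemma pvDrop_keys_gt (k : Int) (rest : List (Int × Int × Int))
    (hr : rest.Pairwise (fun a b => a.2.2 ≤ b.2.2))
    (hk : ∀ u ∈ rest, k ≤ u.2.2) :
    ∀ u ∈ rest.dropWhile (fun u => u.2.2 == k), u.2.2 ≠ k := by
  induction rest with
  | nil => simp
  | cons v vs ih =>
    by_cases hv : v.2.2 = k
    · rw [List.dropWhile_cons_of_pos (by simp [hv])]
      exact ih hr.tail (fun u hu => hk u (by simp [hu]))
    · rw [List.dropWhile_cons_of_neg (by simp [hv])]
      intro u hu
      rcases List.mem_cons.mp hu with rfl | hu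
      · exact hv
      · have h1 : v.2.2 ≤ u.2.2 := (List.pairwise_cons.mp hr).1 u hu
        have h2 : k ≤ v.2.2 := hk v (by simp)
        omega

def pvGroups (s : List (Int × Int × Int)) : List (List (Int × Int)) :=
  match s with
  | [] => []
  | t :: rest =>
      ((t.1, t.2.1) :: (rest.takeWhile (fun u => u.2.2 == t.2.2)).map (fun u => (u.1, u.2.1)))
        :: pvGroups (rest.dropWhile (fun u => u.2.2 == t.2.2))
termination_by s.length
decreasing_by
  simpa using Nat.lt_succ_of_le (List.length_dropWhile_le _ _)

lemma pvFoldA_main (n : Nat) (s : List (Int × Int × Int)) (zs : PySem.Set Int)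
    (zl : List (List (Int × Int))) (tmp : List (Int × Int))
    (hn : s.length ≤ n)
    (hs : s.Pairwise (fun a b => a.2.2 ≤ b.2.2))
    (hfresh : ∀ u ∈ s, PySem.Set.contains zs u.2.2 = false) :
    ((s.foldl pvStepA (zs, zl, tmp)).2.1 ++ [(s.foldl pvStepA (zs, zl, tmp)).2.2])
      = zl ++ [tmp] ++ pvGroups s := by
  induction n generalizing s zs zl tmp with
  | zero =>
    have : s = [] := List.length_eq_zero_iff.mp (Nat.le_zero.mp hn)
    subst this; simp [pvGroups]
  | succ n ih =>
    match s with
    | [] => simp [pvGroups]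
    | t :: rest =>
      have hk : PySem.Set.contains zs t.2.2 = false := hfresh t (by simp)
      simp only [List.foldl_cons, pvStepA, hk, Bool.not_false, if_true]
      rw [← List.takeWhile_append_dropWhile (p := fun u => u.2.2 == t.2.2) (l := rest),
        List.foldl_append]
      rw [pvFoldA_run (rest.takeWhile (fun u => u.2.2 == t.2.2)) (zs.add t.2.2) (zl ++ [tmp]) [(t.1, t.2.1)] (fun u hu => by
        have := List.mem_takeWhile_imp hu
        simp only [beq_iff_eq] at this
        simp [this, PySem.Set.mem_add])]
      rw [ih _ _ _ _ ?hlen ?hpw ?hfr]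
      · simp [pvGroups]
      case hlen =>
        have := List.length_dropWhile_le (fun u => u.2.2 == t.2.2) rest
        simp at hn; omega
      case hpw => exact hs.tail.sublist (List.dropWhile_sublist _)
      case hfr =>
        intro u hu
        have hne : u.2.2 ≠ t.2.2 := pvDrop_keys_gt t.2.2 rest hs.tail
          (fun v hv => (List.pairwise_cons.mp hs).1 v hv) u hu
        have hmem : u ∈ rest := (List.dropWhile_sublist _).mem hu
        have h0 := hfresh u (by simp [hmem])
        rw [PySem.Set.contains_eq_decide] at h0 ⊢
        simp only [decide_eq_false_iff_not] at h0 ⊢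
        simp [PySem.Set.mem_add, h0, hne]

lemma pvFilter_insertBy (c : Int) (x : Int × Int × Int) (l : List (Int × Int × Int))
    (hl : l.Pairwise (fun a b => a.2.2 ≤ b.2.2)) :
    (PySem.List.insertBy (fun a b => decide (a.2.2 < b.2.2)) x l).filter (fun t => t.2.2 == c)
      = l.filter (fun t => t.2.2 == c) ++ (if x.2.2 == c then [x] else []) := by
  induction l with
  | nil => simp only [PySem.List.insertBy, List.filter_nil, List.nil_append]; split <;> simp_all
  | cons y ys ih =>
    simp only [PySem.List.insertBy]
    by_cases hxy : x.2.2 < y.2.2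
    · simp only [hxy, decide_true, if_true]
      by_cases hc : x.2.2 = c
      · have hnil : (y :: ys).filter (fun t => t.2.2 == c) = [] := by
          rw [List.filter_eq_nil_iff]
          intro t ht
          have hyt : y.2.2 ≤ t.2.2 := by
            rcases List.mem_cons.mp ht with rfl | ht'
            · exact le_refl _
            · exact (List.pairwise_cons.mp hl).1 t ht'
          simp only [beq_iff_eq]
          omega
        rw [hnil, List.filter_cons, hnil]
        simp [hc]
      · rw [List.filter_cons]
        simp [hc]
    · simp only [hxy, decide_false, Bool.false_eq_true, if_false]
      rw [List.filter_cons, ih hl.tail, List.filter_cons]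
      split <;> simp

lemma pvFilter_sorted (xs : List (Int × Int × Int)) (c : Int) :
    (PySem.List.sorted xs (fun x => x.2.2) false).filter (fun t => t.2.2 == c)
      = xs.filter (fun t => t.2.2 == c) := by
  induction xs using List.reverseRecOn with
  | nil => simp [PySem.List.sorted]
  | append_singleton xs x ih =>
    have h1 : PySem.List.sorted (xs ++ [x]) (fun t => t.2.2) false
        = PySem.List.insertBy (fun a b => decide (a.2.2 < b.2.2)) x
            (PySem.List.sorted xs (fun t => t.2.2) false) := by
      rw [PySem.List.sorted_eq_foldl_insertBy, PySem.List.sorted_eq_foldl_insertBy,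
        List.foldl_append, List.foldl_cons, List.foldl_nil]
    rw [h1, pvFilter_insertBy c x _ (PySem.List.sorted_pairwise xs (fun t => t.2.2)), ih,
      List.filter_append]
    simp [List.filter_cons]

lemma pvOfList_sublist (l : List Int) : List.Sublist (PySem.Set.ofList l) l := by
  induction l using List.reverseRecOn with
  | nil => simp
  | append_singleton xs x ih =>
    rw [PySem.Set.ofList_append_singleton, PySem.Set.add]
    split
    · exact ih.trans (List.sublist_append_left xs [x])
    · exact List.Sublist.append ih (List.Sublist.refl [x])

lemma pvOfList_pairwise_lt (l : List Int) (h : l.Pairwise (· ≤ ·)) :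
    (PySem.Set.ofList l).Pairwise (· < ·) := by
  have hle : (PySem.Set.ofList l).Pairwise (· ≤ ·) := h.sublist (pvOfList_sublist l)
  have hnd : (PySem.Set.ofList l).Pairwise (· ≠ ·) := PySem.Set.nodup_ofList l
  exact (hle.and hnd).imp (fun h => lt_of_le_of_ne h.1 h.2)

lemma pvDiscard_of_not_mem {α : Type} [BEq α] [LawfulBEq α] (s : PySem.Set α) (x : α)
    (h : x ∉ s) : s.discard x = s := by
  rw [PySem.Set.discard]
  apply List.filter_eq_self.mpr
  intro y hy
  simp only [Bool.not_eq_eq_eq_not, Bool.not_true, beq_eq_false_iff_ne, ne_eq]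
  intro hxy
  exact h (hxy ▸ hy)

lemma pvDiscard_helper (k : Int) (l2 : List Int) (h2 : k ∉ l2) :
    ∀ l1 : List Int, (∀ y ∈ l1, y = k) →
      (PySem.Set.ofList (l1 ++ l2)).discard k = PySem.Set.ofList l2 := by
  intro l1
  induction l1 with
  | nil =>
    intro _
    exact pvDiscard_of_not_mem _ _ (by simp [PySem.Set.mem_ofList, h2])
  | cons y ys ih =>
    intro h1
    have hy : y = k := h1 y (by simp)
    subst hy
    rw [List.cons_append, PySem.Set.ofList_cons]
    show List.filter _ _ = _
    rw [List.filter_cons_of_neg (by simp)]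
    have hid : ((PySem.Set.ofList (ys ++ l2)).discard y).discard y
        = (PySem.Set.ofList (ys ++ l2)).discard y := by
      simp only [PySem.Set.discard, List.filter_filter]
      congr 1
      funext a
      simp [Bool.and_self]
    calc List.filter (fun z => !z == y) ((PySem.Set.ofList (ys ++ l2)).discard y)
        = ((PySem.Set.ofList (ys ++ l2)).discard y).discard y := rfl
      _ = (PySem.Set.ofList (ys ++ l2)).discard y := hid
      _ = PySem.Set.ofList l2 := ih (fun v hv => h1 v (by simp [hv]))

lemma pvOfList_const_append (k : Int) (l1 l2 : List Int)
    (h1 : ∀ y ∈ l1, y = k) (h2 : k ∉ l2) :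
    PySem.Set.ofList (k :: (l1 ++ l2)) = k :: PySem.Set.ofList l2 := by
  rw [PySem.Set.ofList_cons, pvDiscard_helper k l2 h2 l1 h1]

lemma pvGroups_eq_filters (n : Nat) (s : List (Int × Int × Int))
    (hn : s.length ≤ n)
    (hs : s.Pairwise (fun a b => a.2.2 ≤ b.2.2)) :
    pvGroups s = (PySem.Set.ofList (s.map (fun t => t.2.2))).map
      (fun z => (s.filter (fun t => t.2.2 == z)).map (fun u => (u.1, u.2.1))) := by
  induction n generalizing s with
  | zero =>
    have : s = [] := List.length_eq_zero_iff.mp (Nat.le_zero.mp hn)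
    subst this; simp [pvGroups]
  | succ n ih =>
    match s with
    | [] => simp [pvGroups]
    | t :: rest =>
      have hrest : rest = rest.takeWhile (fun u => u.2.2 == t.2.2)
          ++ rest.dropWhile (fun u => u.2.2 == t.2.2) := (List.takeWhile_append_dropWhile).symm
      have hrun : ∀ u ∈ rest.takeWhile (fun u => u.2.2 == t.2.2), u.2.2 = t.2.2 := fun u hu => by
        have := List.mem_takeWhile_imp hu; simpa using this
      have hdrop : ∀ u ∈ rest.dropWhile (fun u => u.2.2 == t.2.2), u.2.2 ≠ t.2.2 :=
        pvDrop_keys_gt t.2.2 rest hs.tail (fun v hv => (List.pairwise_cons.mp hs).1 v hv)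
      have hknotin : t.2.2 ∉ (rest.dropWhile (fun u => u.2.2 == t.2.2)).map (fun t => t.2.2) := by
        intro h
        obtain ⟨u, hu, he⟩ := List.mem_map.mp h
        exact hdrop u hu he
      have hofl : PySem.Set.ofList ((t :: rest).map (fun t => t.2.2))
          = t.2.2 :: PySem.Set.ofList ((rest.dropWhile (fun u => u.2.2 == t.2.2)).map (fun t => t.2.2)) := by
        conv_lhs => rw [List.map_cons, hrest, List.map_append]
        exact pvOfList_const_append t.2.2 _ _
          (fun y hy => by obtain ⟨u, hu, he⟩ := List.mem_map.mp hy; exact he ▸ hrun u hu)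
          hknotin
      rw [hofl, List.map_cons, pvGroups]
      congr 1
      · -- head group
        have hfil : (t :: rest).filter (fun u => u.2.2 == t.2.2)
            = t :: rest.takeWhile (fun u => u.2.2 == t.2.2) := by
          conv_lhs => rw [List.filter_cons_of_pos (by simp), hrest, List.filter_append]
          rw [List.filter_eq_self.mpr (fun u hu => by simp [hrun u hu]),
            List.filter_eq_nil_iff.mpr (fun u hu => by simp [hdrop u hu]),
            List.append_nil]
        rw [hfil]
        simp
      · -- tail groups
        have hlen : (rest.dropWhile (fun u => u.2.2 == t.2.2)).length ≤ n := by
          have := List.length_dropWhile_le (fun u => u.2.2 == t.2.2) rest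
          simp at hn; omega
        rw [ih _ hlen (hs.tail.sublist (List.dropWhile_sublist _))]
        apply List.map_congr_left
        intro z hz
        have hzk : z ≠ t.2.2 := by
          intro h
          subst h
          exact hknotin ((PySem.Set.mem_ofList _ _).mp hz)
        have h1 : (rest.takeWhile (fun u => u.2.2 == t.2.2)).filter (fun u => u.2.2 == z) = [] :=
          List.filter_eq_nil_iff.mpr (fun u hu => by
            simp only [beq_iff_eq]; rw [hrun u hu]; exact fun h => hzk h.symm)
        congr 1
        conv_rhs => rw [List.filter_cons_of_neg (by simp only [beq_iff_eq]; exact fun h => hzk (Eq.symm h)), hrest,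
          List.filter_append, h1, List.nil_append]

-- ===== VERDICT (by name: the statement is the Claim_ definition above) =====
theorem ZLayering_spec : Claim_equal_ZLayering := by
  intro xyz_Cyl _
  unfold Spec_ZLayering
  unfold ZLayering ZLayering_alt
  simp only []
  -- name the sorted list
  set s := PySem.List.sorted xyz_Cyl (fun x => x.2.2) false with hsdef
  -- A's loop is pvStepA
  have hstep : (fun (st : PySem.Set Int × List (List (Int × Int)) × List (Int × Int)) t =>
      if !(PySem.Set.contains st.1 t.2.2) then
        (PySem.Set.add st.1 t.2.2, st.2.1 ++ [st.2.2], [(t.1, t.2.1)])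
      else
        (st.1, st.2.1, st.2.2 ++ [(t.1, t.2.1)])) = pvStepA := rfl
  rw [hstep]
  have hmain := pvFoldA_main s.length s PySem.Set.empty [] [] (le_refl _)
    (PySem.List.sorted_pairwise xyz_Cyl (fun x => x.2.2))
    (fun u _ => rfl)
  -- the loop final state
  have hzl : ((s.foldl pvStepA (PySem.Set.empty, [], [])).2.1
        ++ [(s.foldl pvStepA (PySem.Set.empty, [], [])).2.2])
      = [] :: pvGroups s := by simpa using hmain
  rw [hzl]
  -- remove([]) drops the leading empty group
  have hrem : (PySem.List.remove? (([] : List (Int × Int)) :: pvGroups s) ([] : List (Int × Int))).getD []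
      = pvGroups s := by
    simp [PySem.List.remove?, List.idxOf?, List.findIdx?_cons]
  rw [hrem]
  -- A's groups
  rw [pvGroups_eq_filters s.length s (le_refl _) (PySem.List.sorted_pairwise xyz_Cyl (fun x => x.2.2))]
  -- B's dict
  have hfold : xyz_Cyl.foldl (fun (d : PySem.Dict Int (List (Int × Int))) t =>
        d.modify t.2.2 [] (fun g => g ++ [(t.1, t.2.1)])) PySem.Dict.empty
      = (xyz_Cyl.map (fun t => (t.2.2, (t.1, t.2.1)))).foldl
          (fun d p => d.modify p.1 [] (fun g => g ++ [p.2])) PySem.Dict.empty := by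
    rw [List.foldl_map]
  rw [hfold]
  have hkeys : ((xyz_Cyl.map (fun t => (t.2.2, (t.1, t.2.1)))).foldl
        (fun d p => d.modify p.1 [] (fun g => g ++ [p.2])) PySem.Dict.empty).keys
      = PySem.Set.ofList (xyz_Cyl.map (fun t => t.2.2)) := by
    have h := PySem.Dict.keys_foldl_modify_key
      (xyz_Cyl.map (fun t => (t.2.2, (t.1, t.2.1)))) (fun p => p.1)
      ([] : List (Int × Int)) (fun _ p => (fun g => g ++ [p.2])) PySem.Dict.empty
    simpa [PySem.Set.update_nil_left, List.map_map, Function.comp] using h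
  rw [hkeys]
  -- sorted distinct keys
  have hperm : List.Perm (PySem.Set.ofList (s.map (fun t => t.2.2)))
      (PySem.Set.ofList (xyz_Cyl.map (fun t => t.2.2))) := by
    rw [List.perm_ext_iff_of_nodup (PySem.Set.nodup_ofList _) (PySem.Set.nodup_ofList _)]
    intro a
    rw [PySem.Set.mem_ofList, PySem.Set.mem_ofList]
    constructor
    · intro h
      exact (List.Perm.mem_iff ((PySem.List.sorted_perm xyz_Cyl (fun x => x.2.2) false).map _)).mp h
    · intro h
      exact (List.Perm.mem_iff ((PySem.List.sorted_perm xyz_Cyl (fun x => x.2.2) false).map _)).mpr h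
  have hsortkeys : PySem.List.sorted (PySem.Set.ofList (xyz_Cyl.map (fun t => t.2.2))) (fun z => z) false
      = PySem.Set.ofList (s.map (fun t => t.2.2)) :=
    PySem.List.sorted_eq_of_perm_of_pairwise_lt _ _ _ hperm
      (pvOfList_pairwise_lt _ (by simpa [hsdef] using PySem.List.sorted_map_key_pairwise xyz_Cyl (fun x => x.2.2)))
  rw [hsortkeys]
  rw [List.map_map]
  apply List.map_congr_left
  intro z hz
  have hgetD : ((xyz_Cyl.map (fun t => (t.2.2, (t.1, t.2.1)))).foldl
        (fun d p => d.modify p.1 [] (fun g => g ++ [p.2])) PySem.Dict.empty).getD z []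
      = (xyz_Cyl.filter (fun t => t.2.2 == z)).map (fun u => (u.1, u.2.1)) := by
    rw [PySem.Dict.getD_foldl_modify_append]
    simp [List.filter_map, List.map_map]
    rfl
  rw [hgetD]
  simp only [Function.comp]
  rw [pvFilter_sorted xyz_Cyl z]
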